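-- pv_equiv track=rewrite | github.com/Guaiyu11/ai-code-reviewer | devops/log-parse.py | aggregate_by_time
-- ===== SOURCE A (Python) =====
-- from collections import defaultdict, Counter
--
-- def aggregate_by_time(stats: dict, interval: str = 'hour') -> dict:
--     """按时间聚合统计"""
--     if not stats['timestamps']:
--         return {}
--
--     # 解析时间戳并分组
--     time_groups = defaultdict(int)
--
--     for ts_str, _ in stats['timestamps']:
--         try:
--             # 简化处理：提取小时或日期
--             if interval == 'hour':
--                 key = ts_str[:13] if len(ts_str) >= 13 else ts_str[:10]
--             else:  # day
--                 key = ts_str[:10]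
--             time_groups[key] += 1
--         except (ValueError, IndexError):
--             continue
--
--     return dict(sorted(time_groups.items()))
-- ===== SOURCE B (Python) =====
-- def _key(ts_str, interval):
--     if interval == 'hour':
--         return ts_str[:13] if len(ts_str) >= 13 else ts_str[:10]
--     return ts_str[:10]
--
-- def aggregate_by_time(stats: dict, interval: str = 'hour') -> dict:
--     """按时间聚合统计 — sort the keys once, then count runs of equal keys."""
--     ts = stats['timestamps']
--     if not ts:
--         return {}
--     keys = sorted(_key(ts_str, interval) for ts_str, _ in ts)
--     out = {}
--     run_key, run_len = keys[0], 1
--     for k in keys[1:]: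
--         if k == run_key:
--             run_len += 1
--         else:
--             out[run_key] = run_len
--             run_key, run_len = k, 1
--     out[run_key] = run_len
--     return out
-- ===== Notes on version B (the rewrite author's own statement) =====
-- stated objective: alternative
-- what changed: A counts into a defaultdict while scanning and sorts the dict items at the end; B instead flattens the timestamps to their hour/day keys, sorts that key list once, and emits the result by run-length-counting consecutive equal keys of the sorted list (no counter dictionary is maintained).
import Mathlib
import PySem

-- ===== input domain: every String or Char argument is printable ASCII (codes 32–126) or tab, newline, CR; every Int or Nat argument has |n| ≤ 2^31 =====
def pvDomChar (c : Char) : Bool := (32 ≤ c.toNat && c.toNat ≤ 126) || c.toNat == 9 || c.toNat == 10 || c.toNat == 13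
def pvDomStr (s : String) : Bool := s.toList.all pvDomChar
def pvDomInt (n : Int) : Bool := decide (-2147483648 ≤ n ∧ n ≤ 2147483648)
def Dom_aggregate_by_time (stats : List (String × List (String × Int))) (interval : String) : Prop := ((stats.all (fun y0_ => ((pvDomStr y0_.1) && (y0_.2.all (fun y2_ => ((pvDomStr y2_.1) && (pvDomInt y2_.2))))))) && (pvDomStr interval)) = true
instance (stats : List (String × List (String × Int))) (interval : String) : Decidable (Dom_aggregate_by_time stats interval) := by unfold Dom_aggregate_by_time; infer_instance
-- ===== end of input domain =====

-- B re-implements the aggregation as sort-then-run-length-count instead of A's dict counting; equal return values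
-- are proved on all inputs where A returns (Pre_ excludes the KeyError of a missing 'timestamps' key).

-- ===== PORT A =====
-- A counts keys into a defaultdict(int) while scanning, then sorts the dict items (Python sorts the (key, count)
-- tuples lexicographically → sorted2). stats['timestamps'] raises KeyError when the key is missing → Pre_.
-- String slicing ts_str[:13] / ts_str[:10] is exact via PySem.Str.slice; the try/except can never fire (slicing
-- and dict update raise neither ValueError nor IndexError) and is omitted.
def aggregate_by_time (stats : List (String × List (String × Int))) (interval : String) : List (String × Int) :=
  match PySem.Dict.get? (PySem.Dict.mk stats) "timestamps" with
  | none => []   -- KeyError: excluded by Pre_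
  | some ts =>
    if ts = [] then []
    else
      let time_groups := ts.foldl (fun d p =>
        let key := if interval == "hour" then
            (if 13 ≤ PySem.Str.len p.1 then PySem.Str.slice p.1 none (some 13)
             else PySem.Str.slice p.1 none (some 10))
          else PySem.Str.slice p.1 none (some 10)
        d.modify key 0 (· + 1)) PySem.Dict.empty
      PySem.List.sorted2 time_groups.items (fun p => p.1) (fun p => p.2) false

-- ===== PORT B =====
def pvKey (ts_str interval : String) : String :=
  if interval == "hour" then
    (if 13 ≤ PySem.Str.len ts_str then PySem.Str.slice ts_str none (some 13)
     else PySem.Str.slice ts_str none (some 10))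
  else PySem.Str.slice ts_str none (some 10)

-- the run-length loop of Source B ('for k in keys[1:]'); out[run_key] = run_len always hits a fresh key
-- (runs of a sorted list have pairwise-distinct keys), so each dict write appends one pair.
def pvRle (runKey : String) (runLen : Int) : List String → List (String × Int)
  | [] => [(runKey, runLen)]
  | k :: rest =>
    if k = runKey then pvRle runKey (runLen + 1) rest
    else (runKey, runLen) :: pvRle k 1 rest

def aggregate_by_time_alt (stats : List (String × List (String × Int))) (interval : String) : List (String × Int) :=
  match PySem.Dict.get? (PySem.Dict.mk stats) "timestamps" with
  | none => []   -- KeyError: excluded by Pre_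
  | some ts =>
    if ts = [] then []
    else
      match PySem.List.sorted (ts.map (fun p => pvKey p.1 interval)) (fun x => x) false with
      | [] => []            -- unreachable: ts ≠ [] so the sorted key list is nonempty
      | k0 :: rest => pvRle k0 1 rest

-- ===== PRECONDITION & SPEC =====
-- Pre_ excludes exactly the inputs where stats['timestamps'] raises KeyError (no pair with key "timestamps").
def Pre_aggregate_by_time (stats : List (String × List (String × Int))) (interval : String) : Prop :=
  (PySem.Dict.get? (PySem.Dict.mk stats) "timestamps").isSome = true
instance (stats : List (String × List (String × Int))) (interval : String) : Decidable (Pre_aggregate_by_time stats interval) := by unfold Pre_aggregate_by_time; infer_instance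
def pvWitness_aggregate_by_time : (List (String × List (String × Int))) × String :=
  ([("timestamps", [("2024-01-02T03:04:05", 1), ("2024-01-02T07:00:00", 2)])], "hour")

def Spec_aggregate_by_time (stats : List (String × List (String × Int))) (interval : String) (out : List (String × Int)) : Prop := out = aggregate_by_time_alt stats interval
instance (stats : List (String × List (String × Int))) (interval : String) (out : List (String × Int)) : Decidable (Spec_aggregate_by_time stats interval out) := by unfold Spec_aggregate_by_time; infer_instance

-- ===== CLAIM (what is proved, stated in full; the proofs are below) =====
def Claim_equal_aggregate_by_time : Prop := ∀ (stats : List (String × List (String × Int))) (interval : String), Dom_aggregate_by_time stats interval → Pre_aggregate_by_time stats interval → Spec_aggregate_by_time stats interval (aggregate_by_time stats interval)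

-- ===== LEMMAS AND PROOFS =====

-- insertBy only looks at `before x y` for y in the accumulator: congruence
theorem pv_insertBy_congr {α : Type} (b1 b2 : α → α → Bool) (x : α) (ys : List α)
    (h : ∀ y ∈ ys, b1 x y = b2 x y) :
    PySem.List.insertBy b1 x ys = PySem.List.insertBy b2 x ys := by
  induction ys with
  | nil => rfl
  | cons y t ih =>
    rw [PySem.List.insertBy.eq_2, PySem.List.insertBy.eq_2, h y (List.mem_cons_self),
      ih (fun z hz => h z (List.mem_cons_of_mem _ hz))]

theorem pv_foldl_insertBy_congr {α : Type} (b1 b2 : α → α → Bool) (xs acc : List α)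
    (h : ∀ x ∈ xs, ∀ y, (y ∈ acc ∨ y ∈ xs) → b1 x y = b2 x y) :
    xs.foldl (fun a x => PySem.List.insertBy b1 x a) acc
      = xs.foldl (fun a x => PySem.List.insertBy b2 x a) acc := by
  induction xs generalizing acc with
  | nil => rfl
  | cons x t ih =>
    simp only [List.foldl_cons]
    rw [pv_insertBy_congr b1 b2 x acc
      (fun y hy => h x (List.mem_cons_self) y (Or.inl hy))]
    exact ih _ (fun z hz y hy => by
      rcases hy with hy | hy
      · rcases (PySem.List.mem_insertBy b2 x y acc).mp hy with rfl | hy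
        · exact h z (List.mem_cons_of_mem _ hz) y (Or.inr List.mem_cons_self)
        · exact h z (List.mem_cons_of_mem _ hz) y (Or.inl hy)
      · exact h z (List.mem_cons_of_mem _ hz) y (Or.inr (List.mem_cons_of_mem _ hy)))

-- on a list whose elements are determined by their first component, Python's tuple-sort is a sort by key
theorem pv_sorted2_eq_sorted_fst (xs : List (String × Int))
    (hinj : ∀ a ∈ xs, ∀ b ∈ xs, a.1 = b.1 → a = b) :
    PySem.List.sorted2 xs (fun p => p.1) (fun p => p.2) false
      = PySem.List.sorted xs (fun p => p.1) false := by
  rw [PySem.List.sorted_eq_foldl_insertBy]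
  show xs.foldl (fun a x => PySem.List.insertBy
      (fun a b => decide (a.1 < b.1) || (!decide (b.1 < a.1) && decide (a.2 < b.2))) x a) []
    = xs.foldl (fun a x => PySem.List.insertBy (fun a b => decide (a.1 < b.1)) x a) []
  apply pv_foldl_insertBy_congr
  intro x hx y hy
  rcases hy with hy | hy
  · cases hy
  by_cases hxy : x.1 = y.1
  · have : x = y := hinj x hx y hy hxy
    subst this
    simp
  · by_cases hlt : x.1 < y.1
    · simp [hlt]
    · have : y.1 < x.1 := lt_of_le_of_ne (not_lt.mp hlt) (Ne.symm hxy)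
      simp [hlt, this]

-- the deduplicating fold of PySem.Set pulls a cons to the front
theorem pv_foldl_add_cons {α : Type} [BEq α] [LawfulBEq α] (l : List α) (s : List α) (x : α) :
    List.foldl PySem.Set.add (x :: s) l
      = x :: List.foldl PySem.Set.add s (l.filter (fun y => y != x)) := by
  induction l generalizing s with
  | nil => rfl
  | cons y t ih =>
    by_cases hyx : y = x
    · subst hyx
      have : PySem.Set.add (y :: s) y = y :: s := by
        simp [PySem.Set.add]
      simp [ih]
    · have h1 : PySem.Set.add (x :: s) y = x :: PySem.Set.add s y := by
        simp only [PySem.Set.add, PySem.Set.contains, List.contains_cons]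
        have hbe : (y == x) = false := by simp [hyx]
        simp only [hbe, Bool.false_or]
        split <;> simp_all
      have h2 : (y != x) = true := by simp [hyx]
      simp [h1, h2, ih]

theorem pv_ofList_cons {α : Type} [BEq α] [LawfulBEq α] (x : α) (l : List α) :
    PySem.Set.ofList (x :: l) = x :: PySem.Set.ofList (l.filter (fun y => y != x)) := by
  show List.foldl PySem.Set.add (PySem.Set.add PySem.Set.empty x) l = _
  have : PySem.Set.add PySem.Set.empty x = [x] := rfl
  rw [this]
  exact pv_foldl_add_cons l [] x

theorem pv_foldl_add_sublist {α : Type} [BEq α] (l s : List α) :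
    (List.foldl PySem.Set.add s l).Sublist (s ++ l) := by
  induction l generalizing s with
  | nil => simp
  | cons y t ih =>
    simp only [List.foldl_cons]
    refine (ih (PySem.Set.add s y)).trans ?_
    unfold PySem.Set.add
    split
    · exact List.Sublist.append (List.Sublist.refl s) (List.sublist_cons_self y t)
    · simp
theorem pv_ofList_sublist {α : Type} [BEq α] (l : List α) :
    (PySem.Set.ofList l).Sublist l := by
  have := pv_foldl_add_sublist l ([] : List α)
  simpa [PySem.Set.ofList, PySem.Set.empty] using this

-- dedup of a non-decreasing list is strictly increasing
theorem pv_ofList_pairwise_lt (l : List String) (hp : l.Pairwise (· ≤ ·)) :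
    (PySem.Set.ofList l).Pairwise (· < ·) := by
  have h1 : (PySem.Set.ofList l).Pairwise (· ≤ ·) := hp.sublist (pv_ofList_sublist l)
  have h2 : (PySem.Set.ofList l).Nodup := PySem.Set.nodup_ofList l
  exact (h1.and h2).imp (fun h => lt_of_le_of_ne h.1 h.2)

-- closed form of the run-length loop on a sorted tail
theorem pv_rle_closed (l : List String) (rk : String) (c : Int)
    (hb : ∀ x ∈ l, rk ≤ x) (hp : l.Pairwise (· ≤ ·)) :
    pvRle rk c l = (rk, c + (l.count rk : Int)) ::
      (PySem.Set.ofList (l.filter (fun y => y != rk))).map (fun k => (k, (l.count k : Int))) := by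
  induction l generalizing rk c with
  | nil => simp [pvRle]
  | cons k t ih =>
    have hbk : rk ≤ k := hb k List.mem_cons_self
    have hbt : ∀ x ∈ t, k ≤ x := fun x hx => (List.pairwise_cons.mp hp).1 x hx
    have hpt : t.Pairwise (· ≤ ·) := (List.pairwise_cons.mp hp).2
    by_cases hk : k = rk
    · subst hk
      have ht : pvRle k (c + 1) t = (k, c + 1 + (t.count k : Int)) ::
          (PySem.Set.ofList (t.filter (fun y => y != k))).map (fun k' => (k', (t.count k' : Int))) :=
        ih k (c + 1) hbt hpt
      simp only [pvRle, if_true, ht, List.count_cons_self, List.filter_cons,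
        bne_self_eq_false, Bool.false_eq_true, if_false]
      congr 1
      · refine Prod.ext rfl ?_
        push_cast; ring
      · exact (List.map_congr_left (fun k' hk' => by
          have hk'mem : k' ∈ t.filter (fun y => y != k) := (PySem.Set.mem_ofList _ _).mp hk'
          have : k' ≠ k := by simpa using (List.mem_filter.mp hk'mem).2
          simp [Ne.symm this]))
    · have hlt : rk < k := lt_of_le_of_ne hbk (Ne.symm hk)
      have hnt : ∀ x ∈ t, x ≠ rk := fun x hx => ne_of_gt (lt_of_lt_of_le hlt (hbt x hx))
      have hcount0 : t.count rk = 0 := List.count_eq_zero.mpr (fun h => hnt rk h rfl)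
      have ht : pvRle k 1 t = (k, 1 + (t.count k : Int)) ::
          (PySem.Set.ofList (t.filter (fun y => y != k))).map (fun k' => (k', (t.count k' : Int))) :=
        ih k 1 hbt hpt
      simp only [pvRle, if_neg hk, ht]
      have hfilt : (k :: t).filter (fun y => y != rk) = k :: t := by
        rw [List.filter_cons]
        have hb1 : (k != rk) = true := by simpa using hk
        rw [hb1, if_pos rfl, List.filter_eq_self.mpr (fun a ha => by simpa using hnt a ha)]
      rw [hfilt, pv_ofList_cons]
      have hcrk : ((k :: t).count rk : Int) = 0 := by
        rw [List.count_cons]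
        simp [hk, hcount0]
      rw [List.map_cons]
      congr 1
      · refine Prod.ext rfl ?_
        rw [hcrk]; ring
      congr 1
      · refine Prod.ext rfl ?_
        rw [List.count_cons_self]; push_cast; ring
      · exact (List.map_congr_left (fun k' hk' => by
          have hk'mem : k' ∈ t.filter (fun y => y != k) := (PySem.Set.mem_ofList _ _).mp hk'
          have : k' ≠ k := by simpa using (List.mem_filter.mp hk'mem).2
          simp [Ne.symm this])).symm

-- the central fact: sorting Counter(L).items() tuple-wise equals run-length-counting sorted(L)
theorem pv_counter_sorted_eq_rle (L : List String) (k0 : String) (rest : List String)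
    (hS : PySem.List.sorted L (fun x => x) false = k0 :: rest) :
    PySem.List.sorted2 (PySem.Dict.counter L).items (fun p => p.1) (fun p => p.2) false
      = pvRle k0 1 rest := by
  have hitems := PySem.Dict.items_counter L
  have hpS : (k0 :: rest).Pairwise (· ≤ ·) := by
    have := PySem.List.sorted_pairwise L (fun x => x)
    rwa [hS] at this
  have hbt : ∀ x ∈ rest, k0 ≤ x := (List.pairwise_cons.mp hpS).1
  have hpt : rest.Pairwise (· ≤ ·) := (List.pairwise_cons.mp hpS).2
  -- counts agree between L and its sorted rearrangement
  have hperm : (PySem.List.sorted L (fun x => x) false).Perm L := PySem.List.sorted_perm L _ _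
  have hScount : ∀ k, (k0 :: rest).count k = L.count k := fun k => by
    rw [← hS]; exact hperm.count_eq k
  -- B's result as a map over the deduplicated sorted keys
  have hR : pvRle k0 1 rest
      = (PySem.Set.ofList (k0 :: rest)).map (fun k => (k, (L.count k : Int))) := by
    rw [pv_rle_closed rest k0 1 hbt hpt, pv_ofList_cons, List.map_cons]
    refine congrArg₂ _ ?_ ?_
    · rw [← hScount k0, List.count_cons_self]; push_cast; ring
    · exact List.map_congr_left (fun k hk => by
        have hkmem : k ∈ rest.filter (fun y => y != k0) := (PySem.Set.mem_ofList _ _).mp hk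
        have hne : k ≠ k0 := by simpa using (List.mem_filter.mp hkmem).2
        rw [← hScount k, List.count_cons]
        simp [Ne.symm hne])
  -- B's result is a permutation of the counter items
  have hpermSets : (PySem.Set.ofList (k0 :: rest)).Perm (PySem.Set.ofList L) := by
    rw [List.perm_ext_iff_of_nodup (PySem.Set.nodup_ofList _) (PySem.Set.nodup_ofList _)]
    intro a
    rw [PySem.Set.mem_ofList, PySem.Set.mem_ofList, ← hS]
    exact PySem.List.mem_sorted L _ _ a
  have hpermR : (pvRle k0 1 rest).Perm (PySem.Dict.counter L).items := by
    rw [hR, hitems]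
    exact hpermSets.map _
  -- B's result is strictly increasing in the key
  have hpw : (pvRle k0 1 rest).Pairwise (fun a b => a.1 < b.1) := by
    rw [hR]
    exact (pv_ofList_pairwise_lt _ hpS).map _ (fun a b h => h)
  -- keys determine items
  have hinj : ∀ a ∈ (PySem.Dict.counter L).items, ∀ b ∈ (PySem.Dict.counter L).items,
      a.1 = b.1 → a = b := by
    rw [hitems]
    rintro a ha b hb hab
    obtain ⟨ka, -, rfl⟩ := List.mem_map.mp ha
    obtain ⟨kb, -, rfl⟩ := List.mem_map.mp hb
    simp only at hab
    subst hab
    rfl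
  rw [pv_sorted2_eq_sorted_fst _ hinj]
  exact PySem.List.sorted_eq_of_perm_of_pairwise_lt _ _ _ hpermR hpw

-- ===== VERDICT (by name: the statement is the Claim_ definition above) =====
theorem aggregate_by_time_spec : Claim_equal_aggregate_by_time := by
  intro stats interval _hdom hpre
  unfold Spec_aggregate_by_time aggregate_by_time aggregate_by_time_alt
  unfold Pre_aggregate_by_time at hpre
  obtain ⟨ts, hts⟩ := Option.isSome_iff_exists.mp hpre
  rw [hts]
  by_cases hnil : ts = []
  · simp [hnil]
  · simp only [if_neg hnil]
    set L := ts.map (fun p => pvKey p.1 interval) with hL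
    have hLne : L ≠ [] := by simpa [hL] using hnil
    have hSne : PySem.List.sorted L (fun x => x) false ≠ [] := by
      rw [Ne, PySem.List.sorted_eq_nil_iff]; exact hLne
    obtain ⟨k0, rest, hS⟩ := List.exists_cons_of_ne_nil hSne
    rw [hS]
    -- A's fold over the timestamps is the counter of the key list L
    have hfold : ts.foldl (fun d p =>
        let key := if interval == "hour" then
            (if 13 ≤ PySem.Str.len p.1 then PySem.Str.slice p.1 none (some 13)
             else PySem.Str.slice p.1 none (some 10))
          else PySem.Str.slice p.1 none (some 10)
        d.modify key 0 (· + 1)) PySem.Dict.empty = PySem.Dict.counter L := by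
      rw [hL, PySem.Dict.counter, List.foldl_map]
      rfl
    rw [hfold]
    exact pv_counter_sorted_eq_rle L k0 rest hS
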